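-- pv_equiv track=rewrite | github.com/Data-Crew/reportAssambler | app/converters.py | _extract_field_after_label
-- ===== SOURCE A (Python) =====
-- def _extract_field_after_label(lines: list[str], label: str) -> str | None:
--     """Devuelve la primera línea no vacía posterior a una línea cuyo texto
--     sea exactamente ``label`` (comparación case-insensitive, trimmed)."""
--     target = label.strip().lower()
--     for i, line in enumerate(lines):
--         if line.strip().lower() == target:
--             for j in range(i + 1, min(i + 6, len(lines))):
--                 candidate = lines[j].strip()
--                 if candidate:
--                     return candidate
--     return None
-- ===== SOURCE B (Python) =====
-- def _extract_field_after_label(lines: list[str], label: str) -> str | None: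
--     """Single forward pass: a countdown window of 5 lines is armed (re-armed)
--     at every line matching the label; the first non-empty stripped line seen
--     while the window is open is returned."""
--     target = label.strip().lower()
--     remaining = 0
--     for line in lines:
--         s = line.strip()
--         if remaining > 0:
--             if s:
--                 return s
--             remaining -= 1
--         if s.lower() == target:
--             remaining = 5
--     return None
-- ===== Notes on version B (the rewrite author's own statement) =====
-- stated objective: alternative
-- what changed: Replaced the nested lookahead (for each matching label, an inner 5-line scan with repeated indexing) by a single forward pass that maintains a countdown window counter re-armed at every matching label, removing the inner loop and all indexing.
import Mathlib
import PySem

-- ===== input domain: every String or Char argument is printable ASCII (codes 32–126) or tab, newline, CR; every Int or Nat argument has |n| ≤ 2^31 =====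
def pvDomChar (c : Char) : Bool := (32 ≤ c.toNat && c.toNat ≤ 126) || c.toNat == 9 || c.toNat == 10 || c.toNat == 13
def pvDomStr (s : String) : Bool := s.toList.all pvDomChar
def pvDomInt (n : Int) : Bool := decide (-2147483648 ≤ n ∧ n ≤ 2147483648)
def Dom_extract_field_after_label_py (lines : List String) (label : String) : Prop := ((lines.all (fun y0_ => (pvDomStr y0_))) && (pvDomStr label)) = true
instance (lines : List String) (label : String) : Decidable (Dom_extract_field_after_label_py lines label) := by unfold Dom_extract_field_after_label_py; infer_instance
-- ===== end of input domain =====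

-- B replaces the nested 5-line lookahead by a single pass with a countdown window counter; same cost, no inner loop (objective: alternative).

-- ===== PORT A =====
-- inner loop: for j in range(i+1, min(i+6, len(lines))): candidate = lines[j].strip(); if candidate: return candidate
-- (pyGet? never returns none here since j is produced by the in-bounds range; the none arm only totalizes the match)
def pvInnerA (lines : List String) : List Int → Option String
  | [] => none
  | j :: js =>
    match PySem.List.pyGet? lines j with
    | none => none
    | some line =>
      let candidate := PySem.Str.strip line
      if candidate ≠ "" then some candidate else pvInnerA lines js

-- outer loop: for i, line in enumerate(lines): …
def pvOuterA (lines : List String) (target : String) : List (Int × String) → Option String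
  | [] => none
  | (i, line) :: rest =>
    if PySem.Str.lower (PySem.Str.strip line) = target then
      match pvInnerA lines (PySem.List.pyRange (i + 1) (min (i + 6) (lines.length : Int)) 1) with
      | some c => some c
      | none => pvOuterA lines target rest
    else pvOuterA lines target rest

def extract_field_after_label_py (lines : List String) (label : String) : Option String :=
  pvOuterA lines (PySem.Str.lower (PySem.Str.strip label)) (PySem.List.enumerate lines)

-- ===== PORT B =====
-- single pass with countdown `remaining`, re-armed to 5 at every matching label
def pvLoopB (target : String) : List String → Int → Option String
  | [], _ => none
  | line :: rest, remaining =>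
    let s := PySem.Str.strip line
    if remaining > 0 ∧ s ≠ "" then some s
    else
      let r1 := if remaining > 0 then remaining - 1 else remaining
      let r2 := if PySem.Str.lower s = target then (5 : Int) else r1
      pvLoopB target rest r2

def extract_field_after_label_py_alt (lines : List String) (label : String) : Option String :=
  pvLoopB (PySem.Str.lower (PySem.Str.strip label)) lines 0

-- ===== PRECONDITION & SPEC =====
def Spec_extract_field_after_label_py (lines : List String) (label : String) (out : Option String) : Prop := out = extract_field_after_label_py_alt lines label
instance (lines : List String) (label : String) (out : Option String) : Decidable (Spec_extract_field_after_label_py lines label out) := by unfold Spec_extract_field_after_label_py; infer_instance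

-- ===== CLAIM (what is proved, stated in full; the proofs are below) =====
def Claim_equal_extract_field_after_label_py : Prop := ∀ (lines : List String) (label : String), Dom_extract_field_after_label_py lines label → Spec_extract_field_after_label_py lines label (extract_field_after_label_py lines label)

-- ===== LEMMAS AND PROOFS =====

-- first non-empty stripped line of a list
def pvFirstNE (l : List String) : Option String :=
  (l.map PySem.Str.strip).find? (fun s => !(s == ""))

-- structural restatement of A on the suffix alone (proof-only intermediate)
def pvG (target : String) : List String → Option String
  | [] => none
  | line :: rest =>
    ((if PySem.Str.lower (PySem.Str.strip line) = target then pvFirstNE (rest.take 5) else none)).or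
      (pvG target rest)

theorem pvFind?_take_some {p : String → Bool} {l : List String} {m n : Nat} {x : String}
    (h : m ≤ n) (hm : (l.take m).find? p = some x) : (l.take n).find? p = some x := by
  induction l generalizing m n with
  | nil => simpa using hm
  | cons a t ih =>
    cases m with
    | zero => simp at hm
    | succ m' =>
      cases n with
      | zero => omega
      | succ n' =>
        simp only [List.take_succ_cons, List.find?_cons] at hm ⊢
        cases hpa : p a with
        | true => simpa [hpa] using hm
        | false => simp only [hpa] at hm ⊢; exact ih (by omega) hm

theorem pvFirstNE_or_take (l : List String) (m n : Nat) (h : m ≤ n) :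
    (pvFirstNE (l.take m)).or (pvFirstNE (l.take n)) = pvFirstNE (l.take n) := by
  cases hm : pvFirstNE (l.take m) with
  | none => simp
  | some x =>
    unfold pvFirstNE at hm ⊢
    rw [List.map_take] at hm
    rw [List.map_take, pvFind?_take_some h hm]
    simp

-- inner loop ≡ first non-empty of the 5-line (or shorter) window
theorem pvInnerA_range (lines : List String) (n a : Nat) (h : a + n ≤ lines.length) :
    pvInnerA lines (PySem.List.pyRange (a : Int) ((a : Int) + (n : Int)) 1)
      = pvFirstNE ((lines.drop a).take n) := by
  induction n generalizing a with
  | zero =>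
    rw [PySem.List.pyRange_one_eq_nil (by omega)]
    simp [pvInnerA, pvFirstNE]
  | succ n ih =>
    rw [PySem.List.pyRange_one_cons (by push_cast; omega)]
    have ha : a < lines.length := by omega
    have hget : PySem.List.pyGet? lines (a : Int) = some lines[a] := by
      rw [PySem.List.pyGet?_natCast]; simp [ha]
    have hdrop : lines.drop a = lines[a] :: lines.drop (a + 1) :=
      List.drop_eq_getElem_cons ha
    rw [pvInnerA]
    simp only [hget, hdrop]
    have hcast : (a : Int) + 1 = ((a + 1 : Nat) : Int) := by push_cast; ring
    have hcast2 : (a : Int) + ((n : Nat) + 1 : Nat) = ((a + 1 : Nat) : Int) + (n : Int) := by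
      push_cast; ring
    simp only [List.take_succ_cons, pvFirstNE, List.map_cons, List.find?_cons]
    by_cases hne : PySem.Str.strip lines[a] = ""
    · have hb : (!(PySem.Str.strip lines[a] == "")) = false := by simp [hne]
      rw [if_neg (by simp [hne]), hb]
      have := ih (a + 1) (by omega)
      rw [hcast2, hcast]
      simpa [pvFirstNE] using this
    · have hb : (!(PySem.Str.strip lines[a] == "")) = true := by simp [hne]
      rw [if_pos hne, hb]

-- inner loop with the min-bound, window normalized to take 5
theorem pvInnerA_window (lines : List String) (k : Nat) (hk : k < lines.length) :
    pvInnerA lines (PySem.List.pyRange ((k : Int) + 1) (min ((k : Int) + 6) (lines.length : Int)) 1)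
      = pvFirstNE ((lines.drop (k + 1)).take 5) := by
  set n : Nat := min 5 (lines.length - (k + 1)) with hn
  have h1 : (k + 1) + n ≤ lines.length := by omega
  have h2 : min ((k : Int) + 6) (lines.length : Int) = ((k + 1 : Nat) : Int) + (n : Int) := by
    simp only [hn]; omega
  have h3 : ((k : Int) + 1) = ((k + 1 : Nat) : Int) := by push_cast; ring
  rw [h2, h3, pvInnerA_range lines n (k + 1) h1]
  have hlen : (lines.drop (k + 1)).length = lines.length - (k + 1) := by simp
  have : (lines.drop (k + 1)).take n = (lines.drop (k + 1)).take 5 := by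
    rw [List.take_eq_take_iff]; omega
  rw [this]

-- outer loop ≡ pvG on the suffix
theorem pvOuterA_eq_pvG (target : String) (lines rest : List String) (k : Nat)
    (h : lines.drop k = rest) :
    pvOuterA lines target (PySem.List.enumerate rest (k : Int)) = pvG target rest := by
  induction rest generalizing k with
  | nil => simp [PySem.List.enumerate_nil, pvOuterA, pvG]
  | cons line rest ih =>
    have hk : k < lines.length := by
      by_contra hc
      rw [List.drop_eq_nil_of_le (by omega)] at h
      exact (List.cons_ne_nil _ _) h.symm
    have hdrop : lines.drop (k + 1) = rest := by
      rw [← List.tail_drop, h, List.tail_cons]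
    rw [PySem.List.enumerate_cons, pvOuterA]
    have hwin := pvInnerA_window lines k hk
    rw [hwin, hdrop]
    have hcast : (k : Int) + 1 = ((k + 1 : Nat) : Int) := by push_cast; ring
    rw [hcast, ih (k + 1) hdrop]
    by_cases hm : PySem.Str.lower (PySem.Str.strip line) = target
    · simp only [pvG, hm, if_pos rfl]
      cases pvFirstNE (rest.take 5) <;> simp [Option.or]
    · simp [pvG, hm]

-- countdown pass ≡ (first non-empty within the open window) or pvG
theorem pvLoopB_eq (target : String) (rest : List String) (r : Int)
    (h0 : 0 ≤ r) (h5 : r ≤ 5) :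
    pvLoopB target rest r = (pvFirstNE (rest.take r.toNat)).or (pvG target rest) := by
  induction rest generalizing r with
  | nil => simp [pvLoopB, pvFirstNE, pvG]
  | cons line rest ih =>
    simp only [pvLoopB]
    set s := PySem.Str.strip line with hs
    by_cases h1 : r > 0 ∧ s ≠ ""
    · rw [if_pos h1]
      have : r.toNat = (r - 1).toNat + 1 := by omega
      rw [this, List.take_succ_cons]
      simp only [pvFirstNE, List.map_cons, List.find?_cons, ← hs]
      have : (s == "") = false := by simpa using h1.2
      simp [this, Option.or]
    · rw [if_neg h1]
      push_neg at h1
      by_cases hm : PySem.Str.lower s = target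
      · rw [if_pos hm, ih 5 (by omega) (by omega)]
        have hg : pvG target (line :: rest)
            = (pvFirstNE (rest.take 5)).or (pvG target rest) := by
          rw [pvG, ← hs, hm]; simp
        rw [hg]
        by_cases hr : r > 0
        · have hse : s = "" := h1 hr
          have : r.toNat = (r - 1).toNat + 1 := by omega
          rw [this, List.take_succ_cons]
          have hskip : pvFirstNE (line :: rest.take ((r - 1).toNat))
              = pvFirstNE (rest.take ((r - 1).toNat)) := by
            simp [pvFirstNE, ← hs, hse]
          rw [hskip, ← Option.or_assoc,
            pvFirstNE_or_take rest ((r - 1).toNat) 5 (by omega)]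
          rfl
        · have : r.toNat = 0 := by omega
          simp [this, pvFirstNE]
      · rw [if_neg hm]
        have hg : pvG target (line :: rest) = pvG target rest := by
          rw [pvG, ← hs]; simp [hm]
        rw [hg]
        by_cases hr : r > 0
        · have hse : s = "" := h1 hr
          rw [if_pos hr]
          rw [ih (r - 1) (by omega) (by omega)]
          have : r.toNat = (r - 1).toNat + 1 := by omega
          rw [this, List.take_succ_cons]
          have hskip : pvFirstNE (line :: rest.take ((r - 1).toNat))
              = pvFirstNE (rest.take ((r - 1).toNat)) := by
            simp [pvFirstNE, ← hs, hse]
          rw [hskip]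
        · rw [if_neg hr]
          rw [ih r h0 h5]
          have : r.toNat = 0 := by omega
          simp [this]

-- ===== VERDICT (by name: the statement is the Claim_ definition above) =====
theorem extract_field_after_label_py_spec : Claim_equal_extract_field_after_label_py := by
  intro lines label _
  unfold Spec_extract_field_after_label_py extract_field_after_label_py extract_field_after_label_py_alt
  set target := PySem.Str.lower (PySem.Str.strip label)
  have hA : PySem.List.enumerate lines = PySem.List.enumerate lines ((0 : Nat) : Int) := by
    norm_num
  rw [hA, pvOuterA_eq_pvG target lines lines 0 (by simp),
    pvLoopB_eq target lines 0 (by omega) (by omega)]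
  simp [pvFirstNE]
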